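/- GENERATED by tools/from_farm_form.py from prooffarm-gif/accepted/DGifSetupDecompress.2/Proof.lean (a worked proof of the farm's unit `DGifSetupDecompress.2`,
   accepted by the verdict) — do not edit. -/
import Gif.Spec.Units.DGifSetupDecompress_2
import Gif.Spec.AllSegs
import Gif.Spec.Proved.DGifSetupDecompress_2_Lemmas

open X86 X86.User Asan ProgX.Base ProgX.Base.Spec Gif.Spec

namespace Gif.Spec.DGifSetupDecompress_2

set_option maxRecDepth 4000 in
set_option maxHeartbeats 4000000 in
/-- Segment 2 of `DGifSetupDecompress` (106205H … 1062E6H; dgif_lib.c:834-846): the store block. From `AtStores` (`r12 = Private`,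
`ebp = r15d = CodeSize` in 2 … 8) through the eleven checked stores `Buf[0]`, `BitsPerPixel` … `CrntShiftDWord` (each inside the
live object pv) to the head of the loop l.847 (`AtLoop`: `r12 = Prefix`, `ebx = 0`, `LZOK`). -/
theorem sd2_segment : Gif.Spec.DGifSetupDecompress_2.Statement := by
  intro Lay hLay μ hμ u₀ hcode h_store1 h_store4 h_store8 H rest frames F R e ret v hat
  obtain ⟨hbody, h_r12, h_lo, h_hi, h_r15, h_rem1⟩ := hat
  -- 1. THE PRELUDE
  -- the entry state's facts: `he_room`, `he_top`, …
  have he := hbody.entry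
  v_entry he
  obtain ⟨henv, hrdi⟩ := hbody.pre
  -- where pv is, as numbers (what `v_side`, `u_same`, `u_omega` need to place the stores)
  have hbase := henv.heap.base
  have hpin := hbody.ok.owns.inside hbody.inv.heap (o := (F.pv, 24936)) (List.mem_cons_of_mem _ List.mem_cons_self)
  simp only at hpin
  rw [hbase] at hpin
  have hp1 : 0x800040 ≤ F.pv := by omega
  have hp2 : F.pv + 24968 ≤ 0xC00000 := by omega
  clear hpin
  -- pv is live under the body's frames: every check of the block is inside it
  have hl : LiveIn (H.liveObjs ++ rest) (DGifSetupDecompress.framesIn frames e) F.pv 24936 :=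
    hbody.ok.pv_live.liveIn rest _ (Nat.le_refl _) (Nat.le_refl _)
  -- the present state, in the walker's names
  have w_rip := hbody.rip
  have c_rsp : v.reg .rsp = e.reg .rsp - 120 := hbody.rsp
  have w_eq : Mem.EqOn ProgX.Base.L.textLo ProgX.Base.L.textHi u₀.mem v.mem := ProgX.Base.conv_code_eqOn hbody.code
  have hdf : v.flags .df = false := (show abiInv _ from hbody.abi).1
  have hmx : v.mxcsr &&& 0x1F80 = 0x1F80 := (show abiInv _ from hbody.abi).2
  have hsse := ProgX.Base.sseOK_of_abiInv hbody.abi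
  have w_kept : RegsKept [.rsp] v v := RegsKept.refl _ _
  -- 2. THE WALK: straight code, eleven check calls, to the loop's head
  u_walk hcode [hμ.vendor]
    until [Gif.L.DGifSetupDecompress.at_10632d]
    span [ProgX.Base.L.textLo, ProgX.Base.L.textHi] side (v_side)
  -- 3. THE CHECK GOALS: each access lies inside the live object pv
  case check_10620a =>
    -- l.834 `Private->Buf[0] = 0`
    -- inside `Buf[256]` itself: index 0
    have hun : ShadowUntouched v.mem s_10620a.mem := by v_untouched
    have hb0 := bufLive hbody.ok.pv_live rest (DGifSetupDecompress.framesIn frames e) 0 1 (by decide)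
    simp only [gfield] at hb0
    exact hb0.accSmall hbody.inv.shadow hun _ 1 (by decide) (by u_omega) (by u_omega)
  case check_10621a =>
    -- l.835 `Private->BitsPerPixel = CodeSize`
    have hun : ShadowUntouched v.mem s_10621a.mem := by v_untouched
    exact hl.accSmall hbody.inv.shadow hun _ 4 (by decide) (by u_omega) (by u_omega)
  case check_106237 =>
    -- l.836 `Private->ClearCode = 1 << BitsPerPixel`
    have hun : ShadowUntouched v.mem s_106237.mem := by v_untouched
    exact hl.accSmall hbody.inv.shadow hun _ 4 (by decide) (by u_omega) (by u_omega)
  case check_10624a =>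
    -- l.837 `Private->EOFCode = ClearCode + 1`
    have hun : ShadowUntouched v.mem s_10624a.mem := by v_untouched
    exact hl.accSmall hbody.inv.shadow hun _ 4 (by decide) (by u_omega) (by u_omega)
  case check_10625c =>
    -- l.838 `Private->RunningCode = EOFCode + 1`
    have hun : ShadowUntouched v.mem s_10625c.mem := by v_untouched
    exact hl.accSmall hbody.inv.shadow hun _ 4 (by decide) (by u_omega) (by u_omega)
  case check_10626e =>
    -- l.839 `Private->RunningBits = BitsPerPixel + 1`
    have hun : ShadowUntouched v.mem s_10626e.mem := by v_untouched
    exact hl.accSmall hbody.inv.shadow hun _ 4 (by decide) (by u_omega) (by u_omega)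
  case check_106282 =>
    -- l.840 `Private->MaxCode1 = 1 << RunningBits`
    have hun : ShadowUntouched v.mem s_106282.mem := by v_untouched
    exact hl.accSmall hbody.inv.shadow hun _ 4 (by decide) (by u_omega) (by u_omega)
  case check_106291 =>
    -- l.841 `Private->StackPtr = 0`
    have hun : ShadowUntouched v.mem s_106291.mem := by v_untouched
    exact hl.accSmall hbody.inv.shadow hun _ 4 (by decide) (by u_omega) (by u_omega)
  case check_1062a4 =>
    -- l.842 `Private->LastCode = NO_SUCH_CODE`
    have hun : ShadowUntouched v.mem s_1062a4.mem := by v_untouched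
    exact hl.accSmall hbody.inv.shadow hun _ 4 (by decide) (by u_omega) (by u_omega)
  case check_1062b7 =>
    -- l.843 `Private->CrntShiftState = 0`
    have hun : ShadowUntouched v.mem s_1062b7.mem := by v_untouched
    exact hl.accSmall hbody.inv.shadow hun _ 4 (by decide) (by u_omega) (by u_omega)
  case check_1062ca =>
    -- l.844 `Private->CrntShiftDWord = 0`
    have hun : ShadowUntouched v.mem s_1062ca.mem := by v_untouched
    exact hl.accSmall hbody.inv.shadow hun _ 8 (by decide) (by u_omega) (by u_omega)
  -- 4. THE EXIT 0x10632d (l.847, the head of the loop): `AtLoop`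
  -- what was stored: the return addresses of the check calls (one slot), the LZW scalars, `Buf[0]`; no shadow byte
  have hun : ShadowUntouched v.mem s_1062e4.mem := by v_untouched
  have hsame : Mem.SameExcept [⟨(e.reg .rsp).toNat - 128, (e.reg .rsp).toNat - 120⟩, ⟨F.pv + 8, F.pv + 56⟩,
      ⟨F.pv + 88, F.pv + 89⟩] v.mem s_1062e4.mem := by
    rw [w_mem]
    u_same
  have habi : (conv u₀).inv s_1062e4 := by
    refine ProgX.Base.abiInv_of ?_ ?_
    · rw [w_flags]
      simp only [X86.User.df_setStatus]
      exact w_df_1062ca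
    · rw [w_mxcsr]
      exact hmx
  -- `Body` through the stores, the reader's measure unchanged
  obtain ⟨k_body, k_rem⟩ := Gif.Spec.DGifSetupDecompress_2.sd2_carry (cut' := Gif.L.DGifSetupDecompress.at_10632d) hbody w_rip w_rsp
    (w_kept.get .r13 rfl) w_eq habi hun hsame
  -- the fields `LZOK` reads, each read back through the later stores
  have b_bpp : (Word.part Width.w32 (v.reg .rbp)).toNat < 2 ^ 32 := BitVec.isLt _
  have b_clear : (1#32 <<< ((BitVec.setWidth 8 (Word.part Width.w32 (v.reg .rbp))).toNat % 32)).toNat < 2 ^ 32 := BitVec.isLt _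
  have b_eof : (BitVec.setWidth 32 (Word.ofBV (1#32 <<< ((BitVec.setWidth 8 (Word.part Width.w32 (v.reg .rbp))).toNat % 32))
      + 1).toBitVec).toNat < 2 ^ 32 := BitVec.isLt _
  have b_code : (1#32 <<< ((BitVec.setWidth 8 (Word.part Width.w32 (v.reg .rbp))).toNat % 32) + 2#32).toNat < 2 ^ 32 :=
    BitVec.isLt _
  have b_bits : (Word.part Width.w32 (v.reg .rbp) + 1#32).toNat < 2 ^ 32 := BitVec.isLt _
  have f_bpp : s_1062e4.mem.readLE (v.reg .r12 + 8) 4 = (Word.part Width.w32 (v.reg .rbp)).toNat := by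
    rw [w_mem]
    u_read
  have f_clear : s_1062e4.mem.readLE (v.reg .r12 + 12) 4 =
      (1#32 <<< ((BitVec.setWidth 8 (Word.part Width.w32 (v.reg .rbp))).toNat % 32)).toNat := by
    rw [w_mem]
    u_read
  have f_eof : s_1062e4.mem.readLE (v.reg .r12 + 16) 4 =
      (BitVec.setWidth 32 (Word.ofBV (1#32 <<< ((BitVec.setWidth 8 (Word.part Width.w32 (v.reg .rbp))).toNat % 32))
        + 1).toBitVec).toNat := by
    rw [w_mem]
    u_read
  have f_code : s_1062e4.mem.readLE (v.reg .r12 + 20) 4 =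
      (1#32 <<< ((BitVec.setWidth 8 (Word.part Width.w32 (v.reg .rbp))).toNat % 32) + 2#32).toNat := by
    rw [w_mem]
    u_read
  have f_bits : s_1062e4.mem.readLE (v.reg .r12 + 24) 4 = (Word.part Width.w32 (v.reg .rbp) + 1#32).toNat := by
    rw [w_mem]
    u_read
  have f_sp : s_1062e4.mem.readLE (v.reg .r12 + 40) 4 = 0 := by
    rw [w_mem]
    u_read
  have f_shift : s_1062e4.mem.readLE (v.reg .r12 + 44) 4 = 0 := by
    rw [w_mem]
    u_read
  -- `AtLoop`: `Body`, `r12 = Prefix`, `ebx = 0`, `LZOK`, exactly one byte consumed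
  refine ReachVia.done ⟨k_body, ?_, ?_, ?_, ?_⟩
  · -- `add r12, 0x2158`
    rw [w_r12]
    u_omega
  · -- `mov ebx, 0`
    rw [w_rbx]
    rfl
  · -- the values stored are in range
    refine Gif.Spec.DGifSetupDecompress_2.sd2_lzok _ F.pv (v.reg .rbp) h_lo h_hi ?_ ?_ ?_ ?_ ?_ ?_ ?_
    · rw [← rd_eq_readLE _ (v.reg .r12 + 8) _ _ (by u_omega)]
      exact f_bpp
    · rw [← rd_eq_readLE _ (v.reg .r12 + 12) _ _ (by u_omega)]
      exact f_clear
    · rw [← rd_eq_readLE _ (v.reg .r12 + 16) _ _ (by u_omega)]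
      exact f_eof
    · rw [← rd_eq_readLE _ (v.reg .r12 + 20) _ _ (by u_omega)]
      exact f_code
    · rw [← rd_eq_readLE _ (v.reg .r12 + 24) _ _ (by u_omega)]
      exact f_bits
    · rw [← rd_eq_readLE _ (v.reg .r12 + 40) _ _ (by u_omega)]
      exact f_sp
    · rw [← rd_eq_readLE _ (v.reg .r12 + 44) _ _ (by u_omega)]
      exact f_shift
  · -- no store of the block touched the cursor
    rw [k_rem]
    exact h_rem1

end Gif.Spec.DGifSetupDecompress_2

/-- The unit `DGifSetupDecompress.2`: the store block of `DGifSetupDecompress` takes `AtStores` to `AtLoop`. -/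
theorem Gif.Spec.Proved.DGifSetupDecompress_2_ok : Gif.Spec.DGifSetupDecompress_2.Statement :=
  Gif.Spec.DGifSetupDecompress_2.sd2_segment
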